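-- pv_equiv track=rewrite | github.com/dohun31/algorithm | week_10/210909/2.py | solution
-- ===== SOURCE A (Python) =====
-- directions = {0: (-1, 0), 1: (1, 0), 2: (0, -1), 3: (0, 1)}
--
-- def find_dict(dict, d):
--     if dict == (-1, 0): return (0, -1) if d == 'L' else ((0, 1) if d == 'R' else 0)
--     elif dict == (1, 0): return (0, 1) if d == 'L' else ((0, -1) if d == 'R' else 1)
--     elif dict == (0, -1): return (1, 0) if d == 'L' else ((-1, 0) if d == 'R' else 2)
--     elif dict == (0, 1): return (-1, 0) if d == 'L' else ((1, 0) if d == 'R' else 3)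
--
-- def solution(grid):
--     def dfs(x, y, dict, cnt):
--         # dx, dy 구하기
--         if grid[x][y] == 'S': dx, dy = dict[0], dict[1]
--         elif grid[x][y] == 'L': dx, dy = find_dict(dict, 'L')
--         elif grid[x][y] == 'R': dx, dy = find_dict(dict, 'R')
--         # 방향 번호 체크
--         dnum = find_dict((dx, dy), '')
--         # 이전에 지나간 방향이라면 이제 끝
--         if dnum in visited[x][y]:
--             return cnt
--         # 지나가는 방향 표시
--         visited[x][y].append(dnum)
--         nx, ny = (x + dx) % lr, (y + dy) % lc
--         return dfs(nx, ny, (dx, dy), cnt + 1)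
--     #
--     lr, lc = len(grid), len(grid[0])
--     grid = list(map(list, grid))
--     answer, tmp = [], []
--     for i in range(4):
--         visited = [[[] for _ in range(lc)] for _ in range(lr)]
--         visited[0][0].append(i)
--         nx, ny = (0 + directions[i][0]) % lr, (0 + directions[i][1]) % lc
--         cnt = dfs(nx, ny, directions[i], 1)
--
--         for i in range(len(visited)):
--             for j in range(len(visited[i])):
--                 visited[i][j] = sorted(visited[i][j])
--
--         c = 0
--         for t in tmp:
--             if t == visited: break
--             else: c += 1
--         if c == len(tmp): tmp.append(visited); answer.append(cnt)
--
--     return answer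
-- ===== SOURCE B (Python) =====
-- def solution(grid):
--     lr, lc = len(grid), len(grid[0])
--     delta = [(-1, 0), (1, 0), (0, -1), (0, 1)]
--     turn = {'S': [0, 1, 2, 3], 'L': [2, 3, 1, 0], 'R': [3, 2, 0, 1]}
--     answer, seen = [], []
--     for i in range(4):
--         visited = {(0, 0, i)}
--         x, y = delta[i][0] % lr, delta[i][1] % lc
--         d, cnt = i, 1
--         while True:
--             d = turn[grid[x][y]][d]
--             if (x, y, d) in visited:
--                 break
--             visited.add((x, y, d))
--             x, y = (x + delta[d][0]) % lr, (y + delta[d][1]) % lc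
--             cnt += 1
--         if visited not in seen:
--             seen.append(visited)
--             answer.append(cnt)
--     return answer
-- ===== Notes on version B (the rewrite author's own statement) =====
-- stated objective: simpler
-- what changed: B replaces A's recursive dfs over a per-cell direction-list grid (plus a post-run per-cell sorting pass and a manual counting loop for dedup) by an iterative while-loop with an explicit turn table over a single set of (row, col, direction) triples, deduplicating runs by plain set equality.
-- outside the precondition, e.g. on solution(['SSS', 'SXL', 'SLX', 'SXS']): A returns [4, 4, 3, 3], B returns [4, 4, 3, 3]; on solution(['SX']): A raises UnboundLocalError, B raises KeyError
import Mathlib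
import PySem

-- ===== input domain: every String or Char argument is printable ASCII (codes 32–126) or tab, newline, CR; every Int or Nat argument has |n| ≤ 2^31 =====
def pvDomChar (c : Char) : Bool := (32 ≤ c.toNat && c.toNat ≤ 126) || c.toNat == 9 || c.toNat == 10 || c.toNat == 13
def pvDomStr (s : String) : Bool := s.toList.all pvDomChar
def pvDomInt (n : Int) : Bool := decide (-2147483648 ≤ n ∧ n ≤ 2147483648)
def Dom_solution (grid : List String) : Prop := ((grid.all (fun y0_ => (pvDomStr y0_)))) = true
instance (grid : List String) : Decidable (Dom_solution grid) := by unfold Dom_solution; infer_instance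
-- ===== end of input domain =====

-- B replaces A's recursive dfs and per-cell direction-list grid by an iterative loop over a single
-- set of (row, col, direction) triples, which also removes A's post-run sorting pass (objective:
-- simpler); return values agree on all of Pre_.

-- ===== PORT A =====

def directionsA : PySem.Dict Int (Int × Int) :=
  PySem.Dict.mk [((0 : Int), ((-1 : Int), (0 : Int))), (1, (1, 0)), (2, (0, -1)), (3, (0, 1))]

-- Python's find_dict returns a tuple for d∈{'L','R'}, an int for d='' and None on an unknown tuple.
-- It is split by return type: findDictLR is the tuple leg, findDictNum the int leg (find_dict((dx,dy),'')).
-- The final `else` guards (Python: None) are unreachable on the tuples A ever passes.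
def findDictLR (t : Int × Int) (d : Char) : Int × Int :=
  if t = ((-1 : Int), (0 : Int)) then (if d = 'L' then (0, -1) else if d = 'R' then (0, 1) else t)
  else if t = ((1 : Int), (0 : Int)) then (if d = 'L' then (0, 1) else if d = 'R' then (0, -1) else t)
  else if t = ((0 : Int), (-1 : Int)) then (if d = 'L' then (1, 0) else if d = 'R' then (-1, 0) else t)
  else if t = ((0 : Int), (1 : Int)) then (if d = 'L' then (-1, 0) else if d = 'R' then (1, 0) else t)
  else t

def findDictNum (t : Int × Int) : Int :=
  if t = ((-1 : Int), (0 : Int)) then 0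
  else if t = ((1 : Int), (0 : Int)) then 1
  else if t = ((0 : Int), (-1 : Int)) then 2
  else if t = ((0 : Int), (1 : Int)) then 3
  else -1  -- Python: None; unreachable on the tuples A passes

-- grid[x][y] (indices are results of % so nonnegative; the defaults are unreachable under Pre_)
def gridAtA (g : List (List Char)) (x y : Int) : Char :=
  ((PySem.List.pyGet? ((PySem.List.pyGet? g x).getD []) y)).getD ' '

def cellAtA (v : List (List (List Int))) (x y : Int) : List Int :=
  ((PySem.List.pyGet? ((PySem.List.pyGet? v x).getD []) y)).getD []

-- visited[x][y] = cell (x, y from % lr / % lc, hence nonnegative and in range under Pre_)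
def setCellA (v : List (List (List Int))) (x y : Int) (cell : List Int) : List (List (List Int)) :=
  v.set x.toNat (((PySem.List.pyGet? v x).getD []).set y.toNat cell)

-- dfs; fuel ≥ path length (4*lr*lc+2 suffices under Pre_), a totality guard only
def dfsA (g : List (List Char)) (lr lc : Int) :
    Nat → Int → Int → Int × Int → Int → List (List (List Int)) → Int × List (List (List Int))
  | 0, _, _, _, cnt, vis => (cnt, vis)
  | fuel + 1, x, y, dir, cnt, vis =>
    let ch := gridAtA g x y
    let dxy : Int × Int :=
      if ch = 'S' then dir
      else if ch = 'L' then findDictLR dir 'L'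
      else if ch = 'R' then findDictLR dir 'R'
      else dir  -- Python: dx,dy unbound → UnboundLocalError; excluded by Pre_
    let dnum := findDictNum dxy
    let cell := cellAtA vis x y
    if dnum ∈ cell then (cnt, vis)
    else dfsA g lr lc fuel (PySem.Int.mod (x + dxy.1) lr) (PySem.Int.mod (y + dxy.2) lc)
           dxy (cnt + 1) (setCellA vis x y (cell ++ [dnum]))

def sortGridA (v : List (List (List Int))) : List (List (List Int)) :=
  v.map (fun row => row.map (fun cell => PySem.List.sorted cell (fun k => k) false))

-- the `c`-counting loop over tmp: index of the first t == visited, else len(tmp)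
def cLoopA (tmp : List (List (List (List Int)))) (v : List (List (List Int))) : Int :=
  match tmp with
  | [] => 0
  | t :: ts => if t = v then 0 else cLoopA ts v + 1

def stepOutA (g : List (List Char)) (lr lc : Int)
    (st : List Int × List (List (List (List Int)))) (i : Int) :
    List Int × List (List (List (List Int))) :=
  let base := List.replicate lr.toNat (List.replicate lc.toNat ([] : List Int))
  let vis0 := setCellA base 0 0 (cellAtA base 0 0 ++ [i])
  let dir := (PySem.Dict.get? directionsA i).getD (0, 0)
  let r := dfsA g lr lc ((4 * (lr * lc)).toNat + 2)
             (PySem.Int.mod (0 + dir.1) lr) (PySem.Int.mod (0 + dir.2) lc) dir 1 vis0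
  let sv := sortGridA r.2
  let c := cLoopA st.2 sv
  if c = (st.2.length : Int) then (st.1 ++ [r.1], st.2 ++ [sv]) else st

def solution (grid : List String) : List Int :=
  let lr : Int := grid.length
  let lc : Int := ((grid.headD "").toList.length : Int)
  let g := grid.map String.toList
  ((PySem.List.pyRange 0 4 1).foldl (stepOutA g lr lc) ([], [])).1

-- ===== PORT B =====

def deltaB : List (Int × Int) := [(-1, 0), (1, 0), (0, -1), (0, 1)]

-- turn[c][d]: the new direction number; Python raises KeyError when c is not a key
def turnB : PySem.Dict Char (List Int) :=
  PySem.Dict.mk [('S', [0, 1, 2, 3]), ('L', [2, 3, 1, 0]), ('R', [3, 2, 0, 1])]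

-- the while-True loop; fuel 4*lr*lc+2 bounds the path length, a totality guard only
def loopB (g : List (List Char)) (lr lc : Int) :
    Nat → Int → Int → Int → Int → PySem.Set (Int × Int × Int) → Int × PySem.Set (Int × Int × Int)
  | 0, _, _, _, cnt, vis => (cnt, vis)
  | fuel + 1, x, y, d, cnt, vis =>
    let ch := ((PySem.List.pyGet? ((PySem.List.pyGet? g x).getD []) y)).getD ' '
    -- turn[ch][d]; the defaults are unreachable under Pre_ (KeyError excluded by Pre_)
    let d' := (PySem.List.pyGet? ((PySem.Dict.get? turnB ch).getD [0, 1, 2, 3]) d).getD 0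
    if PySem.Set.contains vis (x, y, d') then (cnt, vis)
    else
      let dd := (PySem.List.pyGet? deltaB d').getD (0, 0)
      loopB g lr lc fuel (PySem.Int.mod (x + dd.1) lr) (PySem.Int.mod (y + dd.2) lc)
        d' (cnt + 1) (PySem.Set.add vis (x, y, d'))

def stepOutB (g : List (List Char)) (lr lc : Int)
    (st : List Int × List (PySem.Set (Int × Int × Int))) (i : Int) :
    List Int × List (PySem.Set (Int × Int × Int)) :=
  let vis0 : PySem.Set (Int × Int × Int) := PySem.Set.ofList [(0, 0, i)]
  let dd := (PySem.List.pyGet? deltaB i).getD (0, 0)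
  let r := loopB g lr lc ((4 * (lr * lc)).toNat + 2)
             (PySem.Int.mod dd.1 lr) (PySem.Int.mod dd.2 lc) i 1 vis0
  if st.2.any (fun s => PySem.Set.equal s r.2) then st
  else (st.1 ++ [r.1], st.2 ++ [r.2])

def solution_alt (grid : List String) : List Int :=
  let lr : Int := grid.length
  let lc : Int := ((grid.headD "").toList.length : Int)
  let g := grid.map String.toList
  ((PySem.List.pyRange 0 4 1).foldl (stepOutB g lr lc) ([], [])).1

-- ===== PRECONDITION & SPEC =====

-- Pre_ excludes grids on which A raises (empty grid, empty first row, a row/cell or a character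
-- other than 'S'/'L'/'R' hit by the beam → IndexError/UnboundLocalError/ZeroDivisionError); since
-- "the beam never reaches the bad cell" is not closed-form, it also excludes some grids with bad
-- cells the beam happens to miss, on which A still returns (see cites).
def Pre_solution (grid : List String) : Prop :=
  grid ≠ [] ∧ 1 ≤ (grid.headD "").toList.length ∧
  (grid.all (fun row => decide ((grid.headD "").toList.length ≤ row.toList.length) &&
     (row.toList.take ((grid.headD "").toList.length)).all
       (fun c => decide (c ∈ (['S', 'L', 'R'] : List Char))))) = true

instance (grid : List String) : Decidable (Pre_solution grid) := by
  unfold Pre_solution; infer_instance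

def pvWitness_solution : List String := ["SL", "RS"]

def Spec_solution (grid : List String) (out : List Int) : Prop := out = solution_alt grid
instance (grid : List String) (out : List Int) : Decidable (Spec_solution grid out) := by
  unfold Spec_solution; infer_instance

-- ===== CLAIM (what is proved, stated in full; the proofs are below) =====
def Claim_equal_solution : Prop :=
  ∀ (grid : List String), Dom_solution grid → Pre_solution grid → Spec_solution grid (solution grid)


-- ===== LEMMAS AND PROOFS =====

-- B's direction number d and A's direction tuple are linked by `dirOf`
def dirOf (d : Int) : Int × Int := (PySem.List.pyGet? deltaB d).getD (0, 0)

-- grid facts extracted from Pre_solution (L rows, C columns, beam-readable cells)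
def GOK (g : List (List Char)) (L C : Nat) : Prop :=
  g.length = L ∧ 0 < L ∧ 0 < C ∧ ∀ row ∈ g, C ≤ row.length ∧
    ∀ j : Nat, j < C → row.getD j ' ' = 'S' ∨ row.getD j ' ' = 'L' ∨ row.getD j ' ' = 'R'

-- invariant of A's visited grid: L×C, every cell duplicate-free
def ShapeV (v : List (List (List Int))) (L C : Nat) : Prop :=
  v.length = L ∧ ∀ r ∈ v, r.length = C ∧ ∀ cell ∈ r, cell.Nodup

-- abstraction relation: B's triple set holds exactly the entries of A's visited grid
def RelV (v : List (List (List Int))) (s : List (Int × Int × Int)) (L C : Nat) : Prop :=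
  ∀ a b c : Int, (a, b, c) ∈ s ↔
    ∃ i j : Nat, i < L ∧ j < C ∧ a = (i : Int) ∧ b = (j : Int) ∧
      c ∈ ((v.getD i []).getD j [])

lemma gridAtA_eq (g : List (List Char)) (x y : Nat) :
    gridAtA g (x : Int) (y : Int) = (g.getD x []).getD y ' ' := by
  simp [gridAtA, pysem]

lemma cellAtA_eq (v : List (List (List Int))) (x y : Nat) :
    cellAtA v (x : Int) (y : Int) = (v.getD x []).getD y [] := by
  simp [cellAtA, pysem]

lemma mod_natCast_lt (a : Int) (L : Nat) (h : 0 < L) :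
    ∃ x : Nat, x < L ∧ PySem.Int.mod a (L : Int) = (x : Int) := by
  have h1 := PySem.Int.mod_lt a (b := (L : Int)) (by exact_mod_cast h)
  have h2 := PySem.Int.mod_nonneg a (b := (L : Int)) (by exact_mod_cast h)
  exact ⟨(PySem.Int.mod a (L : Int)).toNat, by omega, by omega⟩

lemma getD_set_lem {α : Type} (v : List α) (x i : Nat) (d : α) (r' : α) (hx : x < v.length) :
    (v.set x r').getD i d = if i = x then r' else v.getD i d := by
  by_cases h : i = x
  · subst h
    rw [if_pos rfl, List.getD_eq_getElem?_getD, List.getElem?_set, if_pos rfl, if_pos hx]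
    rfl
  · rw [if_neg h, List.getD_eq_getElem?_getD, List.getElem?_set, if_neg (fun hh => h hh.symm),
      ← List.getD_eq_getElem?_getD]

lemma setCellA_eq (v : List (List (List Int))) (x y : Nat) (nc : List Int) :
    setCellA v (x : Int) (y : Int) nc = v.set x ((v.getD x []).set y nc) := by
  simp [setCellA, pysem]

lemma getD_setCellA (v : List (List (List Int))) (L C x y : Nat)
    (hs : v.length = L) (hr : ∀ r ∈ v, r.length = C)
    (hx : x < L) (hy : y < C) (nc : List Int) (i j : Nat) (_hi : i < L) (_hj : j < C) :
    (((setCellA v (x : Int) (y : Int) nc).getD i []).getD j [])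
      = if i = x ∧ j = y then nc else (v.getD i []).getD j [] := by
  have hrow : (v.getD x []) ∈ v := by
    rw [List.getD_eq_getElem v [] (by omega)]
    exact List.getElem_mem _
  have hrc : (v.getD x []).length = C := hr _ hrow
  rw [setCellA_eq, getD_set_lem v x i [] _ (by omega)]
  by_cases hix : i = x
  · subst hix
    rw [if_pos rfl, getD_set_lem _ y j [] nc (by omega)]
    by_cases hjy : j = y
    · subst hjy; rw [if_pos rfl, if_pos ⟨rfl, rfl⟩]
    · rw [if_neg hjy, if_neg (fun hh => hjy hh.2)]
  · rw [if_neg hix, if_neg (fun hh => hix hh.1)]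

lemma shape_setCellA (v : List (List (List Int))) (L C x y : Nat)
    (hs : ShapeV v L C) (hx : x < L) (_hy : y < C) (nc : List Int) (hnc : nc.Nodup) :
    ShapeV (setCellA v (x : Int) (y : Int) nc) L C := by
  obtain ⟨hl, hrows⟩ := hs
  have hrow : (v.getD x []) ∈ v := by
    rw [List.getD_eq_getElem v [] (by omega)]
    exact List.getElem_mem _
  rw [setCellA_eq]
  refine ⟨by simpa using hl, ?_⟩
  intro r hrm
  rcases List.mem_or_eq_of_mem_set hrm with hrm | rfl
  · exact hrows _ hrm
  · refine ⟨by simpa using (hrows _ hrow).1, ?_⟩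
    intro cell hc
    rcases List.mem_or_eq_of_mem_set hc with hc | rfl
    · exact (hrows _ hrow).2 _ hc
    · exact hnc

-- membership form of Python set equality
lemma set_equal_iff {s t : PySem.Set (Int × Int × Int)} :
    PySem.Set.equal s t = true ↔ ∀ p, p ∈ s ↔ p ∈ t := by
  constructor
  · intro h p
    simp only [PySem.Set.equal, Bool.and_eq_true, PySem.Set.issubset, List.all_eq_true,
      PySem.Set.contains, List.contains_iff_mem] at h
    exact ⟨fun hp => h.1 _ hp, fun hp => h.2 _ hp⟩
  · intro h
    simp only [PySem.Set.equal, Bool.and_eq_true, PySem.Set.issubset, List.all_eq_true,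
      PySem.Set.contains, List.contains_iff_mem]
    exact ⟨fun p hp => (h p).1 hp, fun p hp => (h p).2 hp⟩

-- the step lemma: A's dfs and B's loop run in lock-step
lemma stepAB (g : List (List Char)) (L C : Nat) (hg : GOK g L C) :
    ∀ (fuel : Nat) (x y : Nat) (d cnt : Int)
      (vA : List (List (List Int))) (vB : PySem.Set (Int × Int × Int)),
      x < L → y < C → (d = 0 ∨ d = 1 ∨ d = 2 ∨ d = 3) →
      ShapeV vA L C → RelV vA vB L C →
      (dfsA g (L : Int) (C : Int) fuel (x : Int) (y : Int) (dirOf d) cnt vA).1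
        = (loopB g (L : Int) (C : Int) fuel (x : Int) (y : Int) d cnt vB).1
      ∧ ShapeV (dfsA g (L : Int) (C : Int) fuel (x : Int) (y : Int) (dirOf d) cnt vA).2 L C
      ∧ RelV (dfsA g (L : Int) (C : Int) fuel (x : Int) (y : Int) (dirOf d) cnt vA).2
          (loopB g (L : Int) (C : Int) fuel (x : Int) (y : Int) d cnt vB).2 L C := by
  intro fuel
  induction fuel with
  | zero =>
    intro x y d cnt vA vB hx hy hd hsh hrel
    exact ⟨rfl, hsh, hrel⟩
  | succ fuel ih =>
    intro x y d cnt vA vB hx hy hd hsh hrel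
    obtain ⟨hgl, hL, hC, hrows⟩ := hg
    have hgx : (g.getD x []) ∈ g := by
      rw [List.getD_eq_getElem g [] (by omega)]
      exact List.getElem_mem _
    have hch := (hrows _ hgx).2 y hy
    have hchA : gridAtA g (x : Int) (y : Int) = (g.getD x []).getD y ' ' := gridAtA_eq g x y
    have hchB : ((PySem.List.pyGet? ((PySem.List.pyGet? g ((x : Nat) : Int)).getD [])
        ((y : Nat) : Int))).getD ' ' = (g.getD x []).getD y ' ' := gridAtA_eq g x y
    set ch := (g.getD x []).getD y ' ' with hchdef
    set d2 := (PySem.List.pyGet? ((PySem.Dict.get? turnB ch).getD [0, 1, 2, 3]) d).getD 0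
      with hd2def
    have hd2 : d2 = 0 ∨ d2 = 1 ∨ d2 = 2 ∨ d2 = 3 := by
      rw [hd2def]
      rcases hd with rfl | rfl | rfl | rfl <;> rcases hch with h | h | h <;> rw [h] <;> decide
    have hdir : (if ch = 'S' then dirOf d else if ch = 'L' then findDictLR (dirOf d) 'L'
        else if ch = 'R' then findDictLR (dirOf d) 'R' else dirOf d) = dirOf d2 := by
      rw [hd2def]
      rcases hd with rfl | rfl | rfl | rfl <;> rcases hch with h | h | h <;> rw [h] <;> decide
    have hnum : findDictNum (dirOf d2) = d2 := by
      rcases hd2 with h | h | h | h <;> rw [h] <;> decide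
    have hcellA : cellAtA vA (x : Int) (y : Int) = (vA.getD x []).getD y [] := cellAtA_eq vA x y
    obtain ⟨hvl, hvrows⟩ := hsh
    have hvx : (vA.getD x []) ∈ vA := by
      rw [List.getD_eq_getElem vA [] (by omega)]
      exact List.getElem_mem _
    have hrowC : (vA.getD x []).length = C := (hvrows _ hvx).1
    have hcnod : ((vA.getD x []).getD y []).Nodup := by
      have hjl : y < (vA.getD x []).length := by omega
      have hcm : ((vA.getD x []).getD y []) ∈ (vA.getD x []) := by
        rw [List.getD_eq_getElem (vA.getD x []) [] hjl]
        exact List.getElem_mem _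
      exact (hvrows _ hvx).2 _ hcm
    have hmemiff : d2 ∈ (vA.getD x []).getD y [] ↔
        ((x : Int), (y : Int), d2) ∈ vB := by
      rw [hrel]
      constructor
      · intro hk
        exact ⟨x, y, hx, hy, rfl, rfl, hk⟩
      · rintro ⟨i, j, hi, hj, he1, he2, hk⟩
        have hii : i = x := by exact_mod_cast he1.symm
        have hjj : j = y := by exact_mod_cast he2.symm
        rwa [hii, hjj] at hk
    simp only [dfsA, loopB, hchA, hchB, ← hd2def, hdir, hnum, hcellA]
    by_cases hmem : d2 ∈ (vA.getD x []).getD y []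
    · have hcont : PySem.Set.contains vB ((x : Int), (y : Int), d2) = true := by
        simp only [PySem.Set.contains, List.contains_iff_mem]
        exact hmemiff.mp hmem
      rw [if_pos hmem, if_pos hcont]
      exact ⟨rfl, ⟨hvl, hvrows⟩, hrel⟩
    · have hcont : ¬ PySem.Set.contains vB ((x : Int), (y : Int), d2) = true := by
        simp only [PySem.Set.contains, List.contains_iff_mem]
        exact fun hc => hmem (hmemiff.mpr hc)
      rw [if_neg hmem, if_neg hcont]
      obtain ⟨x', hx', hxe⟩ := mod_natCast_lt ((x : Int) + (dirOf d2).1) L hL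
      obtain ⟨y', hy', hye⟩ := mod_natCast_lt ((y : Int) + (dirOf d2).2) C hC
      have hnod' : (((vA.getD x []).getD y []) ++ [d2]).Nodup := by
        refine List.Nodup.append hcnod (List.nodup_singleton _) ?_
        intro a ha hb
        simp only [List.mem_singleton] at hb
        subst hb
        exact hmem ha
      have hsh' : ShapeV (setCellA vA (x : Int) (y : Int)
          (((vA.getD x []).getD y []) ++ [d2])) L C :=
        shape_setCellA vA L C x y ⟨hvl, hvrows⟩ hx hy _ hnod'
      have hrel' : RelV (setCellA vA (x : Int) (y : Int) (((vA.getD x []).getD y []) ++ [d2]))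
          (PySem.Set.add vB ((x : Int), (y : Int), d2)) L C := by
        intro a b c
        rw [PySem.Set.mem_add]
        constructor
        · rintro (hin | heq)
          · obtain ⟨i, j, hi, hj, he1, he2, hk⟩ := (hrel a b c).mp hin
            refine ⟨i, j, hi, hj, he1, he2, ?_⟩
            rw [getD_setCellA vA L C x y hvl (fun r hr => (hvrows r hr).1) hx hy _ i j hi hj]
            split_ifs with hij
            · rw [hij.1, hij.2] at hk
              exact List.mem_append_left _ hk
            · exact hk
          · rw [Prod.ext_iff, Prod.ext_iff] at heq
            obtain ⟨ha, hb, hc⟩ := heq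
            refine ⟨x, y, hx, hy, ha, hb, ?_⟩
            rw [getD_setCellA vA L C x y hvl (fun r hr => (hvrows r hr).1) hx hy _ x y hx hy,
              if_pos ⟨rfl, rfl⟩]
            exact List.mem_append_right _ (by
              simp only [List.mem_singleton]
              exact hc)
        · rintro ⟨i, j, hi, hj, he1, he2, hk⟩
          rw [getD_setCellA vA L C x y hvl (fun r hr => (hvrows r hr).1) hx hy _ i j hi hj] at hk
          by_cases hij : i = x ∧ j = y
          · rw [if_pos hij] at hk
            rcases List.mem_append.mp hk with hk | hk
            · exact Or.inl ((hrel a b c).mpr ⟨i, j, hi, hj, he1, he2, by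
                rw [hij.1, hij.2]; exact hk⟩)
            · right
              simp only [List.mem_singleton] at hk
              rw [he1, he2, hij.1, hij.2, hk]
          · rw [if_neg hij] at hk
            exact Or.inl ((hrel a b c).mpr ⟨i, j, hi, hj, he1, he2, hk⟩)
      have := ih x' y' d2 (cnt + 1)
        (setCellA vA (x : Int) (y : Int) (((vA.getD x []).getD y []) ++ [d2]))
        (PySem.Set.add vB ((x : Int), (y : Int), d2)) hx' hy' hd2 hsh' hrel'
      rw [show (PySem.List.pyGet? deltaB d2).getD ((0 : Int), (0 : Int)) = dirOf d2 from rfl,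
        hxe, hye]
      exact this

-- pointwise cell membership, the common refinement of both dedup tests
def CellEq (v1 v2 : List (List (List Int))) (L C : Nat) : Prop :=
  ∀ i j : Nat, i < L → j < C → ∀ k, k ∈ (v1.getD i []).getD j [] ↔ k ∈ (v2.getD i []).getD j []

lemma sortGrid_eq_iff_cellEq (v1 v2 : List (List (List Int))) (L C : Nat)
    (h1 : ShapeV v1 L C) (h2 : ShapeV v2 L C) :
    sortGridA v1 = sortGridA v2 ↔ CellEq v1 v2 L C := by
  obtain ⟨hl1, hr1⟩ := h1
  obtain ⟨hl2, hr2⟩ := h2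
  have hmem1 : ∀ i : Nat, i < L → (v1.getD i []) ∈ v1 ∧ (v1.getD i []).length = C := by
    intro i hi
    have hm : (v1.getD i []) ∈ v1 := by
      rw [List.getD_eq_getElem v1 [] (by omega)]
      exact List.getElem_mem _
    exact ⟨hm, (hr1 _ hm).1⟩
  have hmem2 : ∀ i : Nat, i < L → (v2.getD i []) ∈ v2 ∧ (v2.getD i []).length = C := by
    intro i hi
    have hm : (v2.getD i []) ∈ v2 := by
      rw [List.getD_eq_getElem v2 [] (by omega)]
      exact List.getElem_mem _
    exact ⟨hm, (hr2 _ hm).1⟩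
  have hcell : ∀ (v : List (List (List Int))), (∀ r ∈ v, r.length = C ∧ ∀ cell ∈ r, cell.Nodup) →
      ∀ i j : Nat, (v.getD i []) ∈ v → j < C → ((v.getD i []).getD j []).Nodup := by
    intro v hr i j hm hj
    have hjl : j < (v.getD i []).length := by rw [(hr _ hm).1]; omega
    have hcm : ((v.getD i []).getD j []) ∈ (v.getD i []) := by
      rw [List.getD_eq_getElem (v.getD i []) [] hjl]
      exact List.getElem_mem _
    exact (hr _ hm).2 _ hcm
  have hgd : ∀ (v : List (List (List Int))) (i j : Nat), i < v.length →
      j < (v.getD i []).length →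
      ((sortGridA v).getD i []).getD j []
        = PySem.List.sorted ((v.getD i []).getD j []) (fun k => k) false := by
    intro v i j hi hj
    have e1 : (sortGridA v).getD i []
        = (v.getD i []).map (fun cell => PySem.List.sorted cell (fun k => k) false) := by
      unfold sortGridA
      rw [List.getD_eq_getElem
            (v.map (fun row => row.map (fun cell => PySem.List.sorted cell (fun k => k) false)))
            [] (by simpa using hi),
          List.getElem_map, List.getD_eq_getElem v [] hi]
    rw [e1, List.getD_eq_getElem
          ((v.getD i []).map (fun cell => PySem.List.sorted cell (fun k => k) false))
          [] (by simpa using hj),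
        List.getElem_map, List.getD_eq_getElem (v.getD i []) [] hj]
  constructor
  · intro heq i j hi hj k
    have hj1 : j < (v1.getD i []).length := by rw [(hmem1 i hi).2]; omega
    have hj2 : j < (v2.getD i []).length := by rw [(hmem2 i hi).2]; omega
    have hs : PySem.List.sorted ((v1.getD i []).getD j []) (fun k => k) false
        = PySem.List.sorted ((v2.getD i []).getD j []) (fun k => k) false := by
      rw [← hgd v1 i j (by omega) hj1, ← hgd v2 i j (by omega) hj2, heq]
    exact (List.perm_ext_iff_of_nodup
      (hcell v1 hr1 i j (hmem1 i hi).1 hj) (hcell v2 hr2 i j (hmem2 i hi).1 hj)).mp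
      ((PySem.List.sorted_id_eq_sorted_id_iff_perm _ _).mp hs) k
  · intro hce
    have hlen : (sortGridA v1).length = (sortGridA v2).length := by
      simp [sortGridA, hl1, hl2]
    apply List.ext_getElem hlen
    intro i hi1 hi2
    have hiL : i < L := by simpa [sortGridA, hl1] using hi1
    have hgd1 : (sortGridA v1)[i] = (sortGridA v1).getD i [] :=
      (List.getD_eq_getElem _ [] hi1).symm
    have hgd2 : (sortGridA v2)[i] = (sortGridA v2).getD i [] :=
      (List.getD_eq_getElem _ [] hi2).symm
    rw [hgd1, hgd2]
    have hrowlen : ∀ (v : List (List (List Int))), v.length = L →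
        (∀ r ∈ v, r.length = C ∧ ∀ cell ∈ r, cell.Nodup) →
        ((sortGridA v).getD i []).length = C := by
      intro v hl hr
      have e1 : (sortGridA v).getD i []
          = (v.getD i []).map (fun cell => PySem.List.sorted cell (fun k => k) false) := by
        unfold sortGridA
        rw [List.getD_eq_getElem
              (v.map (fun row => row.map (fun cell => PySem.List.sorted cell (fun k => k) false)))
              [] (by simp [hl]; omega),
            List.getElem_map, List.getD_eq_getElem v [] (by omega)]
      rw [e1, List.length_map]
      have hm : (v.getD i []) ∈ v := by
        rw [List.getD_eq_getElem v [] (by omega)]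
        exact List.getElem_mem _
      exact (hr _ hm).1
    apply List.ext_getElem (by rw [hrowlen v1 hl1 hr1, hrowlen v2 hl2 hr2])
    intro j hj1 hj2
    have hjC : j < C := by rw [hrowlen v1 hl1 hr1] at hj1; omega
    have hj1g : j < (v1.getD i []).length := by rw [(hmem1 i hiL).2]; omega
    have hj2g : j < (v2.getD i []).length := by rw [(hmem2 i hiL).2]; omega
    rw [← List.getD_eq_getElem _ [] hj1, ← List.getD_eq_getElem _ [] hj2,
        hgd v1 i j (by omega) hj1g, hgd v2 i j (by omega) hj2g]
    exact (PySem.List.sorted_id_eq_sorted_id_iff_perm _ _).mpr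
      ((List.perm_ext_iff_of_nodup
        (hcell v1 hr1 i j (hmem1 i hiL).1 hjC) (hcell v2 hr2 i j (hmem2 i hiL).1 hjC)).mpr
        (hce i j hiL hjC))

lemma equal_iff_cellEq (v1 v2 : List (List (List Int))) (s1 s2 : PySem.Set (Int × Int × Int))
    (L C : Nat) (r1 : RelV v1 s1 L C) (r2 : RelV v2 s2 L C) :
    PySem.Set.equal s1 s2 = true ↔ CellEq v1 v2 L C := by
  rw [set_equal_iff]
  constructor
  · intro h i j hi hj k
    constructor
    · intro hk
      have hp := (h ((i : Int), (j : Int), k)).mp ((r1 _ _ _).mpr ⟨i, j, hi, hj, rfl, rfl, hk⟩)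
      obtain ⟨i', j', hi', hj', he1, he2, hk'⟩ := (r2 _ _ _).mp hp
      have hii : i' = i := by exact_mod_cast he1.symm
      have hjj : j' = j := by exact_mod_cast he2.symm
      rwa [hii, hjj] at hk'
    · intro hk
      have hp := (h ((i : Int), (j : Int), k)).mpr ((r2 _ _ _).mpr ⟨i, j, hi, hj, rfl, rfl, hk⟩)
      obtain ⟨i', j', hi', hj', he1, he2, hk'⟩ := (r1 _ _ _).mp hp
      have hii : i' = i := by exact_mod_cast he1.symm
      have hjj : j' = j := by exact_mod_cast he2.symm
      rwa [hii, hjj] at hk'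
  · intro hce p
    obtain ⟨a, b, c⟩ := p
    rw [r1, r2]
    constructor
    · rintro ⟨i, j, hi, hj, he1, he2, hk⟩
      exact ⟨i, j, hi, hj, he1, he2, (hce i j hi hj _).mp hk⟩
    · rintro ⟨i, j, hi, hj, he1, he2, hk⟩
      exact ⟨i, j, hi, hj, he1, he2, (hce i j hi hj _).mpr hk⟩

lemma cLoopA_eq_length_iff (tmp : List (List (List (List Int)))) (v : List (List (List Int))) :
    cLoopA tmp v = (tmp.length : Int) ↔ v ∉ tmp := by
  induction tmp with
  | nil => simp [cLoopA]
  | cons t ts ih =>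
    by_cases h : t = v
    · subst h
      have hl : cLoopA (t :: ts) t = 0 := by simp [cLoopA]
      rw [hl]
      constructor
      · intro h0
        exfalso
        simp only [List.length_cons] at h0
        push_cast at h0
        omega
      · intro h0
        exfalso
        exact h0 List.mem_cons_self
    · simp only [cLoopA, if_neg h, List.length_cons, List.mem_cons]
      push_cast
      constructor
      · intro h0 hc
        rcases hc with hc | hc
        · exact h hc.symm
        · exact (ih.mp (by omega)) hc
      · intro h0
        have := ih.mpr (fun hc => h0 (Or.inr hc))
        omega

-- the relation between A's tmp list and B's seen list, plus the answers
def OutRel (L C : Nat) (sa : List Int × List (List (List (List Int))))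
    (sb : List Int × List (PySem.Set (Int × Int × Int))) : Prop :=
  sa.1 = sb.1 ∧ List.Forall₂
    (fun t s => ∃ v, ShapeV v L C ∧ RelV v s L C ∧ t = sortGridA v) sa.2 sb.2

lemma mem_iff_any (L C : Nat) (va : List (List (List Int))) (vb : PySem.Set (Int × Int × Int))
    (ha : ShapeV va L C) (hr : RelV va vb L C)
    (tmp : List (List (List (List Int)))) (seen : List (PySem.Set (Int × Int × Int)))
    (h : List.Forall₂ (fun t s => ∃ v, ShapeV v L C ∧ RelV v s L C ∧ t = sortGridA v) tmp seen) :
    (sortGridA va ∈ tmp ↔ seen.any (fun s => PySem.Set.equal s vb) = true) := by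
  induction h with
  | nil => simp
  | cons hp _ ih =>
    rename_i t s ts ss _
    obtain ⟨v, hv, hvr, rfl⟩ := hp
    simp only [List.mem_cons, List.any_cons, Bool.or_eq_true]
    constructor
    · rintro (he | he)
      · exact Or.inl ((equal_iff_cellEq v va s vb L C hvr hr).mpr
          ((sortGrid_eq_iff_cellEq v va L C hv ha).mp he.symm))
      · exact Or.inr (ih.mp he)
    · rintro (he | he)
      · exact Or.inl ((sortGrid_eq_iff_cellEq v va L C hv ha).mpr
          ((equal_iff_cellEq v va s vb L C hvr hr).mp he)).symm
      · exact Or.inr (ih.mpr he)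

lemma stepOutAB (g : List (List Char)) (L C : Nat) (hg : GOK g L C)
    (sa : List Int × List (List (List (List Int))))
    (sb : List Int × List (PySem.Set (Int × Int × Int)))
    (h : OutRel L C sa sb) (i : Int) (hi : i = 0 ∨ i = 1 ∨ i = 2 ∨ i = 3) :
    OutRel L C (stepOutA g (L : Int) (C : Int) sa i) (stepOutB g (L : Int) (C : Int) sb i) := by
  obtain ⟨hgl, hL, hC, hrows⟩ := hg
  have hdirI : (PySem.Dict.get? directionsA i).getD ((0 : Int), (0 : Int)) = dirOf i := by
    rcases hi with rfl | rfl | rfl | rfl <;> decide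
  -- the initial visited grid of A and its relation to B's initial singleton set
  have htn : ((L : Int)).toNat = L := Int.toNat_natCast L
  have htc : ((C : Int)).toNat = C := Int.toNat_natCast C
  set base := List.replicate ((L : Int)).toNat (List.replicate ((C : Int)).toNat ([] : List Int))
    with hbase
  have hbl : base.length = L := by rw [hbase, List.length_replicate, htn]
  have hbr : ∀ r ∈ base, r.length = C ∧ ∀ cell ∈ r, cell.Nodup := by
    intro r hr
    rw [hbase] at hr
    have := List.eq_of_mem_replicate hr
    subst this
    refine ⟨by rw [List.length_replicate, htc], ?_⟩
    intro cell hc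
    have := List.eq_of_mem_replicate hc
    subst this
    exact List.nodup_nil
  have hbsh : ShapeV base L C := ⟨hbl, hbr⟩
  have hbget : ∀ a b : Nat, ((base.getD a []).getD b []) = ([] : List Int) := by
    intro a b
    have h1 : base.getD a [] = [] ∨ base.getD a [] = List.replicate ((C : Int)).toNat [] := by
      rcases Nat.lt_or_ge a base.length with ha | ha
      · right
        rw [hbase, List.getD_eq_getElem _ [] (by simpa [hbase] using ha), List.getElem_replicate]
      · left
        rw [List.getD_eq_getElem?_getD, List.getElem?_eq_none ha]
        rfl
    rcases h1 with h1 | h1 <;> rw [h1]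
    · rfl
    · rcases Nat.lt_or_ge b ((C : Int)).toNat with hb | hb
      · rw [List.getD_eq_getElem _ [] (by simpa using hb), List.getElem_replicate]
      · rw [List.getD_eq_getElem?_getD, List.getElem?_eq_none (by simpa using hb)]
        rfl
  have hcell0 : cellAtA base 0 0 = ([] : List Int) := by
    have h0 := cellAtA_eq base 0 0
    rw [hbget] at h0
    exact h0
  have hvsh : ShapeV (setCellA base 0 0 (cellAtA base 0 0 ++ [i])) L C :=
    shape_setCellA base L C 0 0 hbsh hL hC _ (by rw [hcell0]; simp)
  have hset : ∀ (nc : List Int) (i' j' : Nat), i' < L → j' < C →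
      (((setCellA base 0 0 nc).getD i' []).getD j' []) = if i' = 0 ∧ j' = 0 then nc else [] := by
    intro nc i' j' hi' hj'
    have h0 := getD_setCellA base L C 0 0 hbl (fun r hr => (hbr r hr).1) hL hC nc i' j' hi' hj'
    rw [hbget] at h0
    exact h0
  have hvrel : RelV (setCellA base 0 0 (cellAtA base 0 0 ++ [i]))
      (PySem.Set.ofList [((0 : Int), (0 : Int), i)]) L C := by
    intro a b c
    rw [PySem.Set.mem_ofList]
    simp only [List.mem_singleton]
    constructor
    · intro he
      rw [Prod.ext_iff, Prod.ext_iff] at he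
      obtain ⟨ha, hb, hc⟩ := he
      refine ⟨0, 0, hL, hC, ha, hb, ?_⟩
      rw [hset _ 0 0 hL hC, if_pos ⟨rfl, rfl⟩, hcell0]
      simp only [List.nil_append, List.mem_singleton]
      exact hc
    · rintro ⟨i', j', hi', hj', he1, he2, hk⟩
      rw [hset _ i' j' hi' hj'] at hk
      by_cases hij : i' = 0 ∧ j' = 0
      · rw [if_pos hij, hcell0] at hk
        simp only [List.nil_append, List.mem_singleton] at hk
        rw [Prod.ext_iff, Prod.ext_iff]
        exact ⟨by rw [he1, hij.1]; rfl, by rw [he2, hij.2]; rfl, hk⟩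
      · rw [if_neg hij] at hk
        exact absurd hk (List.not_mem_nil)
  obtain ⟨x0, hx0, hx0e⟩ := mod_natCast_lt ((dirOf i).1) L hL
  obtain ⟨y0, hy0, hy0e⟩ := mod_natCast_lt ((dirOf i).2) C hC
  obtain ⟨hcnt, hshr, hrelr⟩ := stepAB g L C ⟨hgl, hL, hC, hrows⟩
    ((4 * ((L : Int) * (C : Int))).toNat + 2) x0 y0 i 1
    (setCellA base 0 0 (cellAtA base 0 0 ++ [i]))
    (PySem.Set.ofList [((0 : Int), (0 : Int), i)]) hx0 hy0 hi hvsh hvrel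
  simp only [stepOutA, stepOutB, hdirI, ← hbase,
    show (PySem.List.pyGet? deltaB i).getD ((0 : Int), (0 : Int)) = dirOf i from rfl,
    zero_add, hx0e, hy0e]
  have hany := mem_iff_any L C _ _ hshr hrelr sa.2 sb.2 h.2
  by_cases hin : sortGridA (dfsA g (L : Int) (C : Int) ((4 * ((L : Int) * (C : Int))).toNat + 2)
      (x0 : Int) (y0 : Int) (dirOf i) 1 (setCellA base 0 0 (cellAtA base 0 0 ++ [i]))).2 ∈ sa.2
  · rw [if_neg (fun he => ((cLoopA_eq_length_iff sa.2 _).mp he) hin), if_pos (hany.mp hin)]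
    exact h
  · rw [if_pos ((cLoopA_eq_length_iff sa.2 _).mpr hin),
      if_neg (fun hb => hin (hany.mpr hb))]
    refine ⟨by simp only [h.1, hcnt], ?_⟩
    exact List.rel_append h.2
      (List.Forall₂.cons ⟨_, hshr, hrelr, rfl⟩ List.Forall₂.nil)


-- ===== VERDICT (by name: the statement is the Claim_ definition above) =====
theorem solution_spec : Claim_equal_solution := by
  intro grid _ hpre
  unfold Spec_solution
  obtain ⟨hne, hc1, hall⟩ := hpre
  have hrows : ∀ row ∈ grid, (grid.headD "").toList.length ≤ row.toList.length ∧
      ∀ c ∈ row.toList.take ((grid.headD "").toList.length),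
        c = 'S' ∨ c = 'L' ∨ c = 'R' := by
    intro row hrm
    have h := (List.all_eq_true.mp hall) row hrm
    rw [Bool.and_eq_true] at h
    refine ⟨of_decide_eq_true h.1, ?_⟩
    intro c hc
    have h2 := of_decide_eq_true ((List.all_eq_true.mp h.2) c hc)
    simpa using h2
  have hGOK : GOK (grid.map String.toList) grid.length ((grid.headD "").toList.length) := by
    refine ⟨List.length_map .., ?_, hc1, ?_⟩
    · cases grid with
      | nil => exact absurd rfl hne
      | cons a l => simp
    · intro row' hrow'
      obtain ⟨row, hrm, rfl⟩ := List.mem_map.mp hrow'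
      refine ⟨(hrows row hrm).1, ?_⟩
      intro j hj
      have hlen : j < row.toList.length := lt_of_lt_of_le hj (hrows row hrm).1
      have hjt : j < (row.toList.take ((grid.headD "").toList.length)).length := by
        rw [List.length_take]
        omega
      have htake : row.toList[j] ∈ row.toList.take ((grid.headD "").toList.length) := by
        rw [← List.getElem_take (h := hjt)]
        exact List.getElem_mem _
      rw [List.getD_eq_getElem _ _ hlen]
      exact (hrows row hrm).2 _ htake
  have hrange : PySem.List.pyRange 0 4 1 = [0, 1, 2, 3] := by decide
  unfold solution solution_alt
  simp only [hrange, List.foldl_cons, List.foldl_nil]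
  have h0 : OutRel grid.length ((grid.headD "").toList.length)
      ([], []) ([], []) := ⟨rfl, List.Forall₂.nil⟩
  have h1 := stepOutAB _ _ _ hGOK _ _ h0 0 (Or.inl rfl)
  have h2 := stepOutAB _ _ _ hGOK _ _ h1 1 (Or.inr (Or.inl rfl))
  have h3 := stepOutAB _ _ _ hGOK _ _ h2 2 (Or.inr (Or.inr (Or.inl rfl)))
  have h4 := stepOutAB _ _ _ hGOK _ _ h3 3 (Or.inr (Or.inr (Or.inr rfl)))
  exact h4.1
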